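-- pv_equiv track=rewrite | github.com/okalldal/gf-exjobb | work/wn_main.py | parse_multigram_counts
-- ===== SOURCE A (Python) =====
-- from itertools import product
--
-- def parse_multigram_counts(feature_count_file, unigram_poss_dict, count_col, multigram_feature_cols, delimiter='\t', root_symbol=None):
--     counts = dict()
--     multigram_poss_dict = dict()
--     multigram_funs = set()
--     unigram_poss_dict[None] = [None]
--     if root_symbol:
--         unigram_poss_dict[root_symbol] = ['ROOT']
--     for l in feature_count_file:
--         l_split = l.strip('\n').split(delimiter)
--         count = int(l_split[count_col])
--
--         multigram_features = [tuple([l_split[i] for i in feature_cols]) for feature_cols in multigram_feature_cols]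
--         mf = tuple([features if features in unigram_poss_dict.keys() else None for features in multigram_features])
--
--         counts[mf] = counts[mf] + count if mf in counts.keys() else count
--         possible_multigram_funs = list(product(*[unigram_poss_dict[features] for features in mf]))
--         multigram_funs.update(possible_multigram_funs)
--         multigram_poss_dict[mf] = possible_multigram_funs
--     return list(counts.items()), multigram_poss_dict, multigram_funs
-- ===== SOURCE B (Python) =====
-- def parse_multigram_counts(feature_count_file, unigram_poss_dict, count_col, multigram_feature_cols, delimiter='\t', root_symbol=None):
--     unigram_poss_dict[None] = [None]
--     if root_symbol:
--         unigram_poss_dict[root_symbol] = ['ROOT']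
--     # pass 1: accumulate counts per reduced key, in line order
--     counts = {}
--     for l in feature_count_file:
--         parts = l.strip('\n').split(delimiter)
--         key = []
--         for feature_cols in multigram_feature_cols:
--             t = tuple(parts[i] for i in feature_cols)
--             key.append(t if t in unigram_poss_dict else None)
--         key = tuple(key)
--         counts[key] = counts.get(key, 0) + int(parts[count_col])
--     # pass 2: one product computation per distinct key
--     multigram_poss_dict = {}
--     multigram_funs = set()
--     for mf in counts:
--         combos = [()]
--         for features in mf:
--             combos = [c + (f,) for c in combos for f in unigram_poss_dict[features]]
--         multigram_poss_dict[mf] = combos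
--         multigram_funs.update(combos)
--     return list(counts.items()), multigram_poss_dict, multigram_funs
-- ===== Notes on version B (the rewrite author's own statement) =====
-- stated objective: alternative
-- what changed: B splits A's single loop into two passes - accumulate counts per line, then compute each distinct key's possibility product once instead of once per line - and builds the cartesian product by an iterative left fold over the features instead of itertools.product.
import Mathlib
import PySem

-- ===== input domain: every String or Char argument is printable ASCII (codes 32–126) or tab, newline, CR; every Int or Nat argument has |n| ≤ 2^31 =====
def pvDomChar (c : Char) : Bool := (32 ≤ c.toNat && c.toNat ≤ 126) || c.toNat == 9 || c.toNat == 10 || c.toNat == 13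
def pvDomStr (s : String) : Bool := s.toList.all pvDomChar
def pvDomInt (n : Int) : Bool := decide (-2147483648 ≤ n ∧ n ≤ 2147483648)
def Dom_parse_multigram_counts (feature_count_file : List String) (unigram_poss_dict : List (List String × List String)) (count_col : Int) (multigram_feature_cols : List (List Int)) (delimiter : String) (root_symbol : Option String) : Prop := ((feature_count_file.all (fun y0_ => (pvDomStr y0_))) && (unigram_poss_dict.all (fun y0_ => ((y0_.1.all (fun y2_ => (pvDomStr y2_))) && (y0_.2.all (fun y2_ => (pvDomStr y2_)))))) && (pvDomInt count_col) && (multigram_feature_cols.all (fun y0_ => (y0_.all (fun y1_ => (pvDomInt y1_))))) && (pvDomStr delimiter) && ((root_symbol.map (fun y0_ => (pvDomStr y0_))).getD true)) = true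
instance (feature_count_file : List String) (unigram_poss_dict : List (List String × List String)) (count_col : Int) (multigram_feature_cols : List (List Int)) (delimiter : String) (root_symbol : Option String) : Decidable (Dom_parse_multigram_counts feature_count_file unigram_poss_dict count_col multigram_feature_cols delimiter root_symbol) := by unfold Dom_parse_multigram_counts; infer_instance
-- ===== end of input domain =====

-- B replaces A's per-line itertools.product (recomputed on every input line) by a two-pass scheme —
-- first accumulate the counts, then compute each distinct key's product once, built by an iterative
-- left fold instead of pvProduct's recursion; objective: alternative decomposition.
-- NOTE on side effects: the Python A mutates the caller's unigram_poss_dict (adds the None and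
-- root_symbol entries); B performs the same mutation, but the equivalence proved here is about the
-- RETURN value only.

-- a reduced feature tuple: the key None or a feature tuple
abbrev pvK : Type := Option (List String)
-- a function name: None or a string
abbrev pvF : Type := Option String

-- shared by both ports: l.strip('\n').split(delimiter); total form, exact when delimiter ≠ "" (Pre_)
def pvSplitLine (delimiter : String) (l : String) : List String :=
  (PySem.Str.split? (PySem.Str.stripChars l "\n") delimiter).getD []

-- ===== PORT A =====
-- itertools.product(*lists) as a list of lists (last factor varies fastest)
def pvProduct {α : Type} : List (List α) → List (List α)
  | [] => [[]]
  | l :: ls => l.flatMap (fun x => (pvProduct ls).map (fun p => x :: p))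

-- the body of A's 'for l in feature_count_file' loop; state = (counts, multigram_poss_dict, multigram_funs)
def pvStepA (d : PySem.Dict pvK (List pvF)) (count_col : Int)
    (multigram_feature_cols : List (List Int)) (delimiter : String)
    (st : PySem.Dict (List pvK) Int × PySem.Dict (List pvK) (List (List pvF)) × PySem.Set (List pvF))
    (l : String) :
    PySem.Dict (List pvK) Int × PySem.Dict (List pvK) (List (List pvF)) × PySem.Set (List pvF) :=
  let l_split := pvSplitLine delimiter l
  let count := (PySem.Int.ofStr? (PySem.List.pyGetD l_split count_col "")).getD 0
  let multigram_features := multigram_feature_cols.map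
    (fun feature_cols => feature_cols.map (fun i => PySem.List.pyGetD l_split i ""))
  let mf := multigram_features.map
    (fun features => if d.contains (some features) then some features else none)
  let counts := st.1.insert mf (if st.1.contains mf then st.1.getD mf 0 + count else count)
  let possible_multigram_funs := pvProduct (mf.map (fun features => d.getD features []))
  let multigram_funs := PySem.Set.update st.2.2 possible_multigram_funs
  let multigram_poss_dict := st.2.1.insert mf possible_multigram_funs
  (counts, multigram_poss_dict, multigram_funs)

-- Python's unigram_poss_dict[root_symbol] = ['ROOT'] inserts a plain-string key, which no tuple/None
-- lookup performed by this function can ever equal, so it cannot affect the return value (it only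
-- mutates the caller's dict); the dict as seen by every lookup below is argument ∪ {None: [None]}.
def parse_multigram_counts (feature_count_file : List String) (unigram_poss_dict : List (List String × List String)) (count_col : Int) (multigram_feature_cols : List (List Int)) (delimiter : String) (root_symbol : Option String) : (List (List (Option (List String)) × Int)) × (List (List (Option (List String)) × List (List (Option String)))) × List (List (Option String)) :=
  let d : PySem.Dict pvK (List pvF) :=
    (PySem.Dict.ofList (unigram_poss_dict.map (fun p => (some p.1, p.2.map some)))).insert none [none]
  let res := feature_count_file.foldl (pvStepA d count_col multigram_feature_cols delimiter)
    (PySem.Dict.empty, PySem.Dict.empty, PySem.Set.empty)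
  (res.1.items, res.2.1.items, res.2.2)

-- ===== PORT B =====
-- B's reduced key of one parsed line: map each feature tuple to itself if known, else None
def pvKeyOf (d : PySem.Dict pvK (List pvF)) (multigram_feature_cols : List (List Int))
    (parts : List String) : List pvK :=
  multigram_feature_cols.map (fun feature_cols =>
    let t := feature_cols.map (fun i => PySem.List.pyGetD parts i "")
    if d.contains (some t) then some t else none)

-- pass 1 body: counts[key] = counts.get(key, 0) + int(parts[count_col])
def pvStepB1 (d : PySem.Dict pvK (List pvF)) (count_col : Int)
    (multigram_feature_cols : List (List Int)) (delimiter : String)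
    (counts : PySem.Dict (List pvK) Int) (l : String) : PySem.Dict (List pvK) Int :=
  let parts := pvSplitLine delimiter l
  let key := pvKeyOf d multigram_feature_cols parts
  counts.insert key (counts.getD key 0 + (PySem.Int.ofStr? (PySem.List.pyGetD parts count_col "")).getD 0)

-- B's iterative product: combos = [c + (f,) for c in combos for f in upd[features]]
def pvCombos (d : PySem.Dict pvK (List pvF)) (mf : List pvK) : List (List pvF) :=
  mf.foldl (fun combos features => combos.flatMap (fun c => (d.getD features []).map (fun f => c ++ [f]))) [[]]

-- pass 2 body: one product per distinct key
def pvStepB2 (d : PySem.Dict pvK (List pvF))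
    (st : PySem.Dict (List pvK) (List (List pvF)) × PySem.Set (List pvF)) (mf : List pvK) :
    PySem.Dict (List pvK) (List (List pvF)) × PySem.Set (List pvF) :=
  let combos := pvCombos d mf
  (st.1.insert mf combos, PySem.Set.update st.2 combos)

def parse_multigram_counts_alt (feature_count_file : List String) (unigram_poss_dict : List (List String × List String)) (count_col : Int) (multigram_feature_cols : List (List Int)) (delimiter : String) (root_symbol : Option String) : (List (List (Option (List String)) × Int)) × (List (List (Option (List String)) × List (List (Option String)))) × List (List (Option String)) :=
  let d : PySem.Dict pvK (List pvF) :=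
    (PySem.Dict.ofList (unigram_poss_dict.map (fun p => (some p.1, p.2.map some)))).insert none [none]
  let counts := feature_count_file.foldl (pvStepB1 d count_col multigram_feature_cols delimiter) PySem.Dict.empty
  let pf := counts.keys.foldl (pvStepB2 d) (PySem.Dict.empty, PySem.Set.empty)
  (counts.items, pf.1.items, pf.2)

-- ===== PRECONDITION & SPEC =====
-- Pre_ excludes exactly the inputs on which the Python A raises: an empty delimiter when there is
-- at least one line to split (str.split ValueError), a count/feature column index out of range for
-- some line (IndexError), and a count field int() cannot parse (ValueError).
def Pre_parse_multigram_counts (feature_count_file : List String) (unigram_poss_dict : List (List String × List String)) (count_col : Int) (multigram_feature_cols : List (List Int)) (delimiter : String) (root_symbol : Option String) : Prop :=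
  (feature_count_file ≠ [] → delimiter ≠ "") ∧ ∀ l ∈ feature_count_file,
    PySem.Raise.InRange (pvSplitLine delimiter l).length count_col ∧
    (PySem.Int.ofStr? (PySem.List.pyGetD (pvSplitLine delimiter l) count_col "")).isSome = true ∧
    ∀ fc ∈ multigram_feature_cols, ∀ i ∈ fc, PySem.Raise.InRange (pvSplitLine delimiter l).length i
instance (feature_count_file : List String) (unigram_poss_dict : List (List String × List String)) (count_col : Int) (multigram_feature_cols : List (List Int)) (delimiter : String) (root_symbol : Option String) : Decidable (Pre_parse_multigram_counts feature_count_file unigram_poss_dict count_col multigram_feature_cols delimiter root_symbol) := by unfold Pre_parse_multigram_counts; infer_instance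

def pvWitness_parse_multigram_counts : List String × (List (List String × List String)) × Int × List (List Int) × String × Option String :=
  (["a\t1"], [(["a"], ["F"])], 1, [[0]], "\t", none)

-- explicitly assembled decidable equality of the output type (plain infer_instance times out on it)
def pvDecEq1 : DecidableEq (List (List (Option (List String)) × Int)) := inferInstance
def pvDecEq2 : DecidableEq (List (List (Option (List String)) × List (List (Option String)))) := inferInstance
def pvDecEq3 : DecidableEq (List (List (Option String))) := inferInstance
def pvDecEqOut : DecidableEq ((List (List (Option (List String)) × Int)) × (List (List (Option (List String)) × List (List (Option String)))) × List (List (Option String))) :=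
  @instDecidableEqProd _ _ pvDecEq1 (@instDecidableEqProd _ _ pvDecEq2 pvDecEq3)

def Spec_parse_multigram_counts (feature_count_file : List String) (unigram_poss_dict : List (List String × List String)) (count_col : Int) (multigram_feature_cols : List (List Int)) (delimiter : String) (root_symbol : Option String) (out : (List (List (Option (List String)) × Int)) × (List (List (Option (List String)) × List (List (Option String)))) × List (List (Option String))) : Prop := out = parse_multigram_counts_alt feature_count_file unigram_poss_dict count_col multigram_feature_cols delimiter root_symbol
instance (feature_count_file : List String) (unigram_poss_dict : List (List String × List String)) (count_col : Int) (multigram_feature_cols : List (List Int)) (delimiter : String) (root_symbol : Option String) (out : (List (List (Option (List String)) × Int)) × (List (List (Option (List String)) × List (List (Option String)))) × List (List (Option String))) : Decidable (Spec_parse_multigram_counts feature_count_file unigram_poss_dict count_col multigram_feature_cols delimiter root_symbol out) := by unfold Spec_parse_multigram_counts; exact pvDecEqOut out (parse_multigram_counts_alt feature_count_file unigram_poss_dict count_col multigram_feature_cols delimiter root_symbol)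

-- ===== CLAIM =====
def Claim_equal_parse_multigram_counts : Prop := ∀ (feature_count_file : List String) (unigram_poss_dict : List (List String × List String)) (count_col : Int) (multigram_feature_cols : List (List Int)) (delimiter : String) (root_symbol : Option String), Dom_parse_multigram_counts feature_count_file unigram_poss_dict count_col multigram_feature_cols delimiter root_symbol → Pre_parse_multigram_counts feature_count_file unigram_poss_dict count_col multigram_feature_cols delimiter root_symbol → Spec_parse_multigram_counts feature_count_file unigram_poss_dict count_col multigram_feature_cols delimiter root_symbol (parse_multigram_counts feature_count_file unigram_poss_dict count_col multigram_feature_cols delimiter root_symbol)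

-- ===== LEMMAS AND PROOFS =====

-- proof-side abbreviations for the per-line values both ports compute
def pvMF (d : PySem.Dict pvK (List pvF)) (cols : List (List Int)) (delim l : String) : List pvK :=
  pvKeyOf d cols (pvSplitLine delim l)
def pvCnt (cc : Int) (delim l : String) : Int :=
  (PySem.Int.ofStr? (PySem.List.pyGetD (pvSplitLine delim l) cc "")).getD 0
def pvVal (d : PySem.Dict pvK (List pvF)) (mf : List pvK) : List (List pvF) :=
  pvProduct (mf.map (fun features => d.getD features []))

-- the three independent components of A's loop body, and the two of B's pass 2
def pvFC (d : PySem.Dict pvK (List pvF)) (cc : Int) (cols : List (List Int)) (δ : String)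
    (c : PySem.Dict (List pvK) Int) (l : String) : PySem.Dict (List pvK) Int :=
  c.insert (pvMF d cols δ l)
    (if c.contains (pvMF d cols δ l) then c.getD (pvMF d cols δ l) 0 + pvCnt cc δ l else pvCnt cc δ l)
def pvFP (d : PySem.Dict pvK (List pvF)) (cols : List (List Int)) (δ : String)
    (p : PySem.Dict (List pvK) (List (List pvF))) (l : String) : PySem.Dict (List pvK) (List (List pvF)) :=
  p.insert (pvMF d cols δ l) (pvVal d (pvMF d cols δ l))
def pvFF (d : PySem.Dict pvK (List pvF)) (cols : List (List Int)) (δ : String)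
    (s : PySem.Set (List pvF)) (l : String) : PySem.Set (List pvF) :=
  PySem.Set.update s (pvVal d (pvMF d cols δ l))
def pvPStep (d : PySem.Dict pvK (List pvF))
    (p : PySem.Dict (List pvK) (List (List pvF))) (mf : List pvK) : PySem.Dict (List pvK) (List (List pvF)) :=
  p.insert mf (pvVal d mf)
def pvFStep (d : PySem.Dict pvK (List pvF)) (s : PySem.Set (List pvF)) (mf : List pvK) : PySem.Set (List pvF) :=
  PySem.Set.update s (pvVal d mf)

-- a triple-valued fold whose components do not interact splits into three folds
theorem pv_foldl_triple {α β γ δ : Type} (f : α → δ → α) (g : β → δ → β) (h : γ → δ → γ) :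
    ∀ (l : List δ) (a : α) (b : β) (c : γ),
      l.foldl (fun st x => (f st.1 x, g st.2.1 x, h st.2.2 x)) (a, b, c) =
        (l.foldl f a, l.foldl g b, l.foldl h c) := by
  intro l
  induction l with
  | nil => intro a b c; rfl
  | cons x l ih => intro a b c; simpa using ih (f a x) (g b x) (h c x)

theorem pv_foldl_pair {α β δ : Type} (f : α → δ → α) (g : β → δ → β) :
    ∀ (l : List δ) (a : α) (b : β),
      l.foldl (fun st x => (f st.1 x, g st.2 x)) (a, b) = (l.foldl f a, l.foldl g b) := by
  intro l
  induction l with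
  | nil => intro a b; rfl
  | cons x l ih => intro a b; simpa using ih (f a x) (g b x)

-- the iterative product over the value lists equals the recursive one
theorem pv_combos_aux (d : PySem.Dict pvK (List pvF)) :
    ∀ (mf : List pvK) (acc : List (List pvF)),
      mf.foldl (fun combos features => combos.flatMap (fun c => (d.getD features []).map (fun f => c ++ [f]))) acc =
        acc.flatMap (fun c => (pvVal d mf).map (fun p => c ++ p)) := by
  intro mf
  induction mf with
  | nil => intro acc; simp [pvVal, pvProduct]
  | cons features mf ih =>
    intro acc
    rw [List.foldl_cons, ih]
    simp [pvVal, pvProduct, List.map_flatMap, List.flatMap_map, List.map_map,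
      Function.comp_def, List.append_assoc, List.flatMap_assoc]

theorem pvCombos_eq (d : PySem.Dict pvK (List pvF)) (mf : List pvK) :
    pvCombos d mf = pvVal d mf := by
  unfold pvCombos
  rw [pv_combos_aux]
  simp

-- distinct first occurrences of l not already in seen, in order
def pvNewKeys {κ : Type} [DecidableEq κ] (seen : List κ) : List κ → List κ
  | [] => []
  | k :: l => if k ∈ seen then pvNewKeys seen l else k :: pvNewKeys (seen ++ [k]) l

theorem pv_ofList_eq_newKeys {κ : Type} [BEq κ] [LawfulBEq κ] [DecidableEq κ] :
    ∀ (l seen : List κ), List.foldl PySem.Set.add seen l = seen ++ pvNewKeys seen l := by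
  intro l
  induction l with
  | nil => intro seen; simp [pvNewKeys]
  | cons k l ih =>
    intro seen
    by_cases hk : k ∈ seen
    · simp [pvNewKeys, hk, ih seen]
    · simp only [pvNewKeys, if_neg hk, List.foldl_cons, PySem.Set.add_of_not_mem hk, ih (seen ++ [k])]
      simp

-- an idempotent-per-key fold visits only the first occurrence of each key
theorem pv_fold_dedup {σ κ : Type} [DecidableEq κ] (step : σ → κ → σ)
    (Inv : σ → Prop) (Good : σ → κ → Prop)
    (hInv : ∀ s k, Inv s → Inv (step s k))
    (h1 : ∀ s k, Inv s → Good (step s k) k)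
    (h2 : ∀ s k, Inv s → Good s k → step s k = s)
    (h3 : ∀ s k k', Good s k → Good (step s k') k) :
    ∀ (l : List κ) (s : σ) (seen : List κ), Inv s → (∀ k ∈ seen, Good s k) →
      List.foldl step s l = List.foldl step s (pvNewKeys seen l) := by
  intro l
  induction l with
  | nil => intro s seen _ _; simp [pvNewKeys]
  | cons k l ih =>
    intro s seen hI hG
    by_cases hk : k ∈ seen
    · simp only [pvNewKeys, if_pos hk, List.foldl_cons, h2 s k hI (hG k hk)]
      exact ih s seen hI hG
    · simp only [pvNewKeys, if_neg hk, List.foldl_cons]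
      refine ih (step s k) (seen ++ [k]) (hInv s k hI) ?_
      intro k' hk'
      rcases List.mem_append.mp hk' with h | h
      · exact h3 s k' k (hG k' h)
      · simp only [List.mem_singleton] at h
        subst h; exact h1 s k' hI

-- inserting a key's current value back is a no-op
theorem pv_insert_self {κ ν : Type} [BEq κ] [LawfulBEq κ] (d : PySem.Dict κ ν) (k : κ) (v : ν)
    (hnd : d.keys.Nodup) (h : d.get? k = some v) : d.insert k v = d := by
  apply PySem.Dict.ext
  have hc : d.contains k = true := by
    rw [PySem.Dict.contains_eq_isSome_get?, h]; rfl
  rw [PySem.Dict.items_insert_of_contains d v hc]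
  conv_rhs => rw [← List.map_id d.items]
  apply List.map_congr_left
  intro p hp
  cases p with
  | mk a b =>
    by_cases hpk : ((a, b).1 == k) = true
    · have hk1 : a = k := eq_of_beq hpk
      have h2 : d.get? a = some b := PySem.Dict.get?_of_mem_items d hp hnd
      rw [hk1, h] at h2
      injection h2 with hv
      simp [hk1, hv]
    · simp [hpk]

-- updating a set with elements it already has is a no-op
theorem pv_update_of_subset {α : Type} [BEq α] [LawfulBEq α] :
    ∀ (xs : List α) (s : PySem.Set α), (∀ x ∈ xs, x ∈ s) → PySem.Set.update s xs = s := by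
  intro xs
  induction xs with
  | nil => intro s _; simp [PySem.Set.update]
  | cons x xs ih =>
    intro s hs
    rw [PySem.Set.update_cons, PySem.Set.add_of_mem (hs x (by simp))]
    exact ih s (fun y hy => hs y (by simp [hy]))

-- A's loop body, componentwise
theorem pvStepA_eq (d : PySem.Dict pvK (List pvF)) (cc : Int) (cols : List (List Int)) (δ : String) :
    pvStepA d cc cols δ = fun st l =>
      (pvFC d cc cols δ st.1 l, pvFP d cols δ st.2.1 l, pvFF d cols δ st.2.2 l) := by
  funext st l
  simp only [pvStepA, pvFC, pvFP, pvFF, pvMF, pvKeyOf, pvCnt, pvVal, List.map_map, Function.comp_def]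

-- B's pass-1 body equals A's counts component
theorem pvStepB1_eq (d : PySem.Dict pvK (List pvF)) (cc : Int) (cols : List (List Int)) (δ : String) :
    pvStepB1 d cc cols δ = pvFC d cc cols δ := by
  funext counts l
  simp only [pvStepB1, pvFC, pvMF, pvCnt]
  by_cases hc : counts.contains (pvKeyOf d cols (pvSplitLine δ l)) = true
  · rw [if_pos hc]
  · rw [if_neg hc, PySem.Dict.getD_of_not_contains counts 0 (by simpa using hc), zero_add]

-- B's pass-2 body, componentwise, with the product lemma applied
theorem pvStepB2_eq (d : PySem.Dict pvK (List pvF)) :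
    pvStepB2 d = fun st mf => (pvPStep d st.1 mf, pvFStep d st.2 mf) := by
  funext st mf
  simp only [pvStepB2, pvPStep, pvFStep, pvCombos_eq]

-- pass 1 produces the keys in first-occurrence order
theorem pv_keys_eq (d : PySem.Dict pvK (List pvF)) (cc : Int) (cols : List (List Int)) (δ : String)
    (F : List String) :
    (F.foldl (pvStepB1 d cc cols δ) PySem.Dict.empty).keys = pvNewKeys [] (F.map (pvMF d cols δ)) := by
  rw [pvStepB1_eq]
  show (F.foldl (fun (c : PySem.Dict (List pvK) Int) (l : String) =>
      c.insert (pvMF d cols δ l)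
        (if c.contains (pvMF d cols δ l) then c.getD (pvMF d cols δ l) 0 + pvCnt cc δ l
         else pvCnt cc δ l)) PySem.Dict.empty).keys = pvNewKeys [] (F.map (pvMF d cols δ))
  have h0 := PySem.Dict.keys_foldl_insert_key F (pvMF d cols δ)
      (fun c l => if c.contains (pvMF d cols δ l) then c.getD (pvMF d cols δ l) 0 + pvCnt cc δ l
                  else pvCnt cc δ l) (PySem.Dict.empty : PySem.Dict (List pvK) Int)
  rw [h0, PySem.Dict.keys_empty, PySem.Set.update_nil_left, PySem.Set.ofList_eq_foldl,
    pv_ofList_eq_newKeys]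
  simp

-- A's poss-dict fold over the lines equals B's fold over the distinct keys
theorem pv_poss_eq (d : PySem.Dict pvK (List pvF)) (cols : List (List Int)) (δ : String)
    (F : List String) :
    F.foldl (pvFP d cols δ) PySem.Dict.empty =
      (pvNewKeys [] (F.map (pvMF d cols δ))).foldl (pvPStep d) PySem.Dict.empty := by
  have h1 : F.foldl (pvFP d cols δ) PySem.Dict.empty =
      (F.map (pvMF d cols δ)).foldl (pvPStep d) PySem.Dict.empty :=
    (List.foldl_map (f := pvMF d cols δ) (g := pvPStep d) (l := F) (init := PySem.Dict.empty)).symm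
  rw [h1]
  exact pv_fold_dedup (pvPStep d) (fun p => p.keys.Nodup) (fun p k => p.get? k = some (pvVal d k))
    (fun p k hI => PySem.Dict.nodup_keys_insert p k (pvVal d k) hI)
    (fun p k _ => PySem.Dict.get?_insert_self p k (pvVal d k))
    (fun p k hI hG => pv_insert_self p k (pvVal d k) hI hG)
    (fun p k k' hG => by
      show (p.insert k' (pvVal d k')).get? k = some (pvVal d k)
      rw [PySem.Dict.get?_insert]
      by_cases hkk : k = k'
      · rw [if_pos hkk, hkk]
      · rw [if_neg hkk]; exact hG)
    (F.map (pvMF d cols δ)) PySem.Dict.empty []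
    (by simp [PySem.Dict.keys_empty]) (by intro k hk; simp at hk)

-- A's funs fold over the lines equals B's fold over the distinct keys
theorem pv_funs_eq (d : PySem.Dict pvK (List pvF)) (cols : List (List Int)) (δ : String)
    (F : List String) :
    F.foldl (pvFF d cols δ) PySem.Set.empty =
      (pvNewKeys [] (F.map (pvMF d cols δ))).foldl (pvFStep d) PySem.Set.empty := by
  have h1 : F.foldl (pvFF d cols δ) PySem.Set.empty =
      (F.map (pvMF d cols δ)).foldl (pvFStep d) PySem.Set.empty :=
    (List.foldl_map (f := pvMF d cols δ) (g := pvFStep d) (l := F) (init := PySem.Set.empty)).symm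
  rw [h1]
  exact pv_fold_dedup (pvFStep d) (fun _ => True) (fun s k => ∀ x ∈ pvVal d k, x ∈ s)
    (fun _ _ _ => trivial)
    (fun s k _ => by intro x hx; exact (PySem.Set.mem_update s (pvVal d k) x).mpr (Or.inr hx))
    (fun s k _ hG => pv_update_of_subset (pvVal d k) s hG)
    (fun s k k' hG => by intro x hx; exact (PySem.Set.mem_update s (pvVal d k') x).mpr (Or.inl (hG x hx)))
    (F.map (pvMF d cols δ)) PySem.Set.empty []
    trivial (by intro k hk; simp at hk)

theorem pv_main (feature_count_file : List String) (unigram_poss_dict : List (List String × List String)) (count_col : Int) (multigram_feature_cols : List (List Int)) (delimiter : String) (root_symbol : Option String) :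
    parse_multigram_counts feature_count_file unigram_poss_dict count_col multigram_feature_cols delimiter root_symbol =
      parse_multigram_counts_alt feature_count_file unigram_poss_dict count_col multigram_feature_cols delimiter root_symbol := by
  simp only [parse_multigram_counts, parse_multigram_counts_alt]
  set d : PySem.Dict pvK (List pvF) :=
    (PySem.Dict.ofList (unigram_poss_dict.map (fun p => (some p.1, p.2.map some)))).insert none [none] with hd
  rw [pvStepA_eq d count_col multigram_feature_cols delimiter,
    pv_foldl_triple (pvFC d count_col multigram_feature_cols delimiter)
      (pvFP d multigram_feature_cols delimiter) (pvFF d multigram_feature_cols delimiter)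
      feature_count_file PySem.Dict.empty PySem.Dict.empty PySem.Set.empty]
  rw [← pvStepB1_eq d count_col multigram_feature_cols delimiter]
  rw [pv_keys_eq d count_col multigram_feature_cols delimiter feature_count_file]
  rw [pvStepB2_eq d,
    pv_foldl_pair (pvPStep d) (pvFStep d)
      (pvNewKeys [] (feature_count_file.map (pvMF d multigram_feature_cols delimiter)))
      PySem.Dict.empty PySem.Set.empty]
  rw [pv_poss_eq d multigram_feature_cols delimiter feature_count_file,
    pv_funs_eq d multigram_feature_cols delimiter feature_count_file]

-- ===== VERDICT (by name: the statement is the Claim_ definition above) =====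
theorem parse_multigram_counts_spec : Claim_equal_parse_multigram_counts := by
  intro feature_count_file unigram_poss_dict count_col multigram_feature_cols delimiter root_symbol _ _
  unfold Spec_parse_multigram_counts
  exact pv_main feature_count_file unigram_poss_dict count_col multigram_feature_cols delimiter root_symbol
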